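-- pv_equiv track=rewrite | github.com/anirudhakulkarni/competitive-programming | codeforces/anirudhak47/102/B.py | solve
-- ===== SOURCE A (Python) =====
-- def solve(n,i):
--     xx=str(n)
--     if len(xx)==1:
--         return n,i
--     ans=0
--     for j in range(len(xx)):
--         ans+=int(xx[j])
--     return solve(ans,i+1)
-- ===== SOURCE B (Python) =====
-- def solve(n, i):
--     # Iterative digital-root with arithmetic digit extraction (no string conversion).
--     while n > 9:
--         s = 0
--         m = n
--         while m:
--             s += m % 10
--             m //= 10
--         n = s
--         i += 1
--     return n, i
-- ===== Notes on version B (the rewrite author's own statement) =====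
-- stated objective: alternative
-- what changed: Replaces A's tail recursion over str(n) with an iterative while-loop that extracts digits arithmetically via % 10 and // 10, so no string conversion happens at all.
import Mathlib
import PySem

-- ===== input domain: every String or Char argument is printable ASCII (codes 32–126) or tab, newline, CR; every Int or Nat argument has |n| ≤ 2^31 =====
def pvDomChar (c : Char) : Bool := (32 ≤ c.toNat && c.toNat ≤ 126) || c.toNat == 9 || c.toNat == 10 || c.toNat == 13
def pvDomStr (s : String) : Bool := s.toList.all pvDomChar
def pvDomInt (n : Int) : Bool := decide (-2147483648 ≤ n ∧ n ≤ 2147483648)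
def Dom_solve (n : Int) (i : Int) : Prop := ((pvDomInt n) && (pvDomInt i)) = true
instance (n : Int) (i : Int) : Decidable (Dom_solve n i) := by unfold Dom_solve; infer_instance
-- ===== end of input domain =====

-- B replaces A's tail recursion over str(n) with an iterative loop extracting digits by % 10 and // 10 (no string conversion); return-value equivalence on n ≥ 0.

-- ===== PORT A =====
-- A's recursion, with a fuel counter that only makes it total (Python's recursion
-- terminates on every input it accepts; n.natAbs + 1 steps are proved sufficient below).
def solveFuel (fuel : Nat) (n : Int) (i : Int) : Int × Int :=
  match fuel with
  | 0 => (n, i)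
  | fuel + 1 =>
    let xx := PySem.Int.toChars n                    -- xx = str(n)
    if PySem.List.len xx == 1 then (n, i)
    else
      -- ans = 0; for j in range(len(xx)): ans += int(xx[j])
      -- (int('-') raises in Python; the .getD 0 default is only reached outside Pre_)
      let ans := (PySem.List.pyRange 0 (PySem.List.len xx) 1).foldl
        (fun ans j => ans + (PySem.Int.ofChars? [PySem.List.pyGetD xx j ' ']).getD 0) 0
      solveFuel fuel ans (i + 1)

def solve (n : Int) (i : Int) : Int × Int := solveFuel (n.natAbs + 1) n i

-- ===== PORT B =====
-- inner loop: while m: s += m % 10; m //= 10.  Structural recursion on a fuel counter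
-- that only makes the loop total (m.toNat steps are proved sufficient below); the 0 < m
-- guard is the totality guard: the loop is only entered with m > 9 and m stays nonnegative.
def digitSumLoop (fuel : Nat) (m : Int) (s : Int) : Int :=
  match fuel with
  | 0 => s
  | fuel + 1 =>
    if 0 < m then digitSumLoop fuel (PySem.Int.floordiv m 10) (s + PySem.Int.mod m 10) else s

-- outer loop: while n > 9: n = digit_sum(n); i += 1   (again with a fuel totality guard)
def solveOuter (fuel : Nat) (n : Int) (i : Int) : Int × Int :=
  match fuel with
  | 0 => (n, i)
  | fuel + 1 =>
    if 9 < n then solveOuter fuel (digitSumLoop n.toNat n 0) (i + 1) else (n, i)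

def solve_alt (n : Int) (i : Int) : Int × Int := solveOuter (n.toNat + 1) n i

-- ===== PRECONDITION & SPEC =====
-- Pre_ excludes exactly n < 0, where Python A raises ValueError (int('-') on the sign
-- character of str(n)); B's while-loop guard is simply false there.
def Pre_solve (n : Int) (i : Int) : Prop := 0 ≤ n
instance (n : Int) (i : Int) : Decidable (Pre_solve n i) := by unfold Pre_solve; infer_instance
def pvWitness_solve : Int × Int := (19, 0)

def Spec_solve (n : Int) (i : Int) (out : Int × Int) : Prop := out = solve_alt n i
instance (n : Int) (i : Int) (out : Int × Int) : Decidable (Spec_solve n i out) := by unfold Spec_solve; infer_instance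

-- ===== CLAIM (what is proved, stated in full; the proofs are below) =====
def Claim_equal_solve : Prop := ∀ (n : Int) (i : Int), Dom_solve n i → Pre_solve n i → Spec_solve n i (solve n i)

-- ===== LEMMAS AND PROOFS =====

-- the inner loop of B computes the base-10 digit sum (any sufficient fuel)
lemma digitSumLoop_natCast : ∀ (f k : Nat) (s : Int), k ≤ f →
    digitSumLoop f (k : Int) s = s + ((Nat.digits 10 k).sum : Int) := by
  intro f
  induction f with
  | zero =>
    intro k s hk
    have : k = 0 := by omega
    subst this
    simp [digitSumLoop]
  | succ f ih =>
    intro k s hk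
    rw [digitSumLoop]
    by_cases hpos : 0 < k
    · rw [if_pos (by exact_mod_cast hpos)]
      rw [show ((10:Int)) = ((10:Nat):Int) from rfl]
      rw [PySem.Int.floordiv_natCast, PySem.Int.mod_natCast]
      rw [ih (k / 10) _ (by omega)]
      rw [Nat.digits_def' (by norm_num : 1 < 10) hpos]
      simp only [List.sum_cons]
      push_cast; ring
    · have : k = 0 := by omega
      subst this
      rw [if_neg (by norm_num)]
      simp

lemma digitSumLoop_eq (n : Int) (hn : 0 ≤ n) :
    digitSumLoop n.toNat n 0 = ((Nat.digits 10 n.toNat).sum : Int) := by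
  have h := digitSumLoop_natCast n.toNat n.toNat 0 le_rfl
  rw [Int.toNat_of_nonneg hn] at h
  simpa using h

lemma digitSumLoop_lt (n : Int) (hn : 9 < n) : digitSumLoop n.toNat n 0 < n := by
  rw [digitSumLoop_eq n (by omega)]
  have h10 : 10 ≤ n.toNat := by omega
  rw [Nat.digits_def' (by norm_num : 1 < 10) (by omega : 0 < n.toNat)]
  have hle := Nat.digit_sum_le 10 (n.toNat / 10)
  simp only [List.sum_cons]
  omega

-- int(c) for a single digit char, as A's loop body applies it
lemma charVal_digitChar (d : Nat) (hd : d < 10) :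
    (PySem.Int.ofChars? [Nat.digitChar d]).getD 0 = (d : Int) := by
  interval_cases d <;> decide

-- Nat.toDigitsCore in terms of Nat.digits (only reached with 0 < t)
lemma toDigitsCore_eq : ∀ (f t : Nat) (ds : List Char), 0 < t → t < 10 ^ f →
    Nat.toDigitsCore 10 f t ds = ((Nat.digits 10 t).map Nat.digitChar).reverse ++ ds := by
  intro f
  induction f with
  | zero => intro t ds h1 h2; omega
  | succ f ih =>
    intro t ds h1 h2
    simp only [Nat.toDigitsCore]
    rw [Nat.digits_def' (by norm_num : 1 < 10) h1]
    by_cases hz : t / 10 = 0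
    · rw [if_pos hz, hz]
      simp
    · rw [if_neg hz]
      rw [ih (t / 10) _ (by omega) (by
        rw [pow_succ] at h2
        exact Nat.div_lt_of_lt_mul (by omega))]
      simp

lemma toDigits_eq (t : Nat) :
    Nat.toDigits 10 t = if t = 0 then ['0'] else ((Nat.digits 10 t).map Nat.digitChar).reverse := by
  by_cases h : t = 0
  · subst h; decide
  · rw [if_neg h, Nat.toDigits]
    simpa using toDigitsCore_eq (t + 1) t [] (by omega)
      (lt_of_lt_of_le (Nat.lt_pow_self (by norm_num)) (Nat.pow_le_pow_right (by norm_num) (Nat.le_succ t)))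

lemma toChars_nonneg (n : Int) (hn : 0 ≤ n) :
    PySem.Int.toChars n = Nat.toDigits 10 n.toNat := by
  simp [PySem.Int.toChars, not_lt.2 hn]

-- length of str(n) for n ≥ 0: 1 iff n ≤ 9
lemma toDigits_length_eq_one_iff (t : Nat) : (Nat.toDigits 10 t).length = 1 ↔ t < 10 := by
  rw [toDigits_eq]
  by_cases h : t = 0
  · simp [h]
  · rw [if_neg h]
    simp only [List.length_reverse, List.length_map]
    constructor
    · intro hl
      have := Nat.lt_base_pow_length_digits (b := 10) (m := t) (by norm_num)
      rw [hl] at this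
      simpa using this
    · intro ht
      rw [Nat.digits_def' (by norm_num : 1 < 10) (by omega : 0 < t), Nat.div_eq_of_lt ht]
      simp

-- the digit sum A computes from str(n)
lemma charSum_eq (t : Nat) (ht : 10 ≤ t) :
    ((Nat.toDigits 10 t).map (fun c => (PySem.Int.ofChars? [c]).getD 0)).sum
      = ((Nat.digits 10 t).sum : Int) := by
  rw [toDigits_eq, if_neg (by omega)]
  rw [List.map_reverse, List.sum_reverse, List.map_map]
  have hcg : ∀ d ∈ Nat.digits 10 t,
      ((fun c => (PySem.Int.ofChars? [c]).getD 0) ∘ Nat.digitChar) d = (d : Int) := by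
    intro d hd
    exact charVal_digitChar d (Nat.digits_lt_base (by norm_num) hd)
  rw [List.map_congr_left hcg]
  rw [← Nat.cast_list_sum]

-- main induction: with sufficient fuel on each side, A's recursion equals B's loop on n ≥ 0
lemma main_eq : ∀ (f g : Nat) (n i : Int), 0 ≤ n → n < (f : Int) → n < (g : Int) →
    solveFuel f n i = solveOuter g n i := by
  intro f
  induction f with
  | zero => intro g n i h1 h2 _; omega
  | succ f ih =>
    intro g n i h1 h2 h3
    obtain ⟨g, rfl⟩ : ∃ g', g = g' + 1 := ⟨g - 1, by omega⟩
    have hchars : PySem.Int.toChars n = Nat.toDigits 10 n.toNat := toChars_nonneg n h1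
    by_cases hle : n ≤ 9
    · -- single digit: both stop
      have hlen : (Nat.toDigits 10 n.toNat).length = 1 :=
        (toDigits_length_eq_one_iff n.toNat).2 (by omega)
      have hcond : (PySem.List.len (PySem.Int.toChars n) == 1) = true := by
        simp [hchars, PySem.List.len_eq, hlen]
      rw [solveFuel, solveOuter]
      simp only [hcond, if_true]
      rw [if_neg (by omega : ¬ (9:Int) < n)]
    · -- multi digit: one step on each side, then the induction hypothesis
      have ht : 10 ≤ n.toNat := by omega
      have hlen : (Nat.toDigits 10 n.toNat).length ≠ 1 := by
        simp only [ne_eq, toDigits_length_eq_one_iff]; omega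
      have hcond : ¬ ((PySem.List.len (PySem.Int.toChars n) == 1) = true) := by
        simp only [hchars, PySem.List.len_eq, beq_iff_eq]
        intro h
        exact hlen (by exact_mod_cast h)
      rw [solveFuel]
      rw [if_neg hcond]
      simp only [hchars, PySem.List.len_eq]
      rw [PySem.List.foldl_pyRange_zero_pyGetD' (Nat.toDigits 10 n.toNat) ' '
        (fun ans c => ans + (PySem.Int.ofChars? [c]).getD 0) 0]
      rw [PySem.List.foldl_add, charSum_eq n.toNat ht, zero_add]
      have hlt : ((Nat.digits 10 n.toNat).sum : Int) < n := by
        have := digitSumLoop_lt n (by omega)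
        rwa [digitSumLoop_eq n h1] at this
      rw [solveOuter]
      rw [if_pos (by omega : (9:Int) < n), digitSumLoop_eq n h1]
      exact ih g _ (i + 1) (by positivity) (by omega) (by omega)

-- ===== VERDICT (by name: the statement is the Claim_ definition above) =====
theorem solve_spec : Claim_equal_solve := by
  intro n i _ hpre
  unfold Spec_solve solve solve_alt
  exact main_eq (n.natAbs + 1) (n.toNat + 1) n i hpre (by omega) (by omega)
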